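-- pv_equiv track=rewrite | github.com/gummyboars/lunboks | eldritch/events.py | spawn_counts
-- ===== SOURCE A (Python) =====
-- def spawn_counts(to_spawn, on_board, in_outskirts, monster_limit, outskirts_limit):
--   available_board_count = max(monster_limit - on_board, 0)
--   if to_spawn <= available_board_count:
--     return to_spawn, 0, 0
--
--   to_outskirts = to_spawn - available_board_count
--   available_outskirts_count = max(outskirts_limit - in_outskirts, 0)
--   if to_outskirts <= available_outskirts_count:
--     return available_board_count, to_outskirts, 0
--
--   remaining = to_outskirts - available_outskirts_count
--   in_outskirts = outskirts_limit
--   steps_remaining = 0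
--   if outskirts_limit == 0:
--     steps_remaining = -1
--   while remaining > 0:
--     if in_outskirts == 0:
--       steps_remaining += 1
--     in_outskirts += 1
--     remaining -= 1
--     if in_outskirts > outskirts_limit:
--       in_outskirts = 0
--
--   return available_board_count, available_outskirts_count+1, steps_remaining
-- ===== SOURCE B (Python) =====
-- def spawn_counts(to_spawn, on_board, in_outskirts, monster_limit, outskirts_limit):
--   board_room = max(monster_limit - on_board, 0)
--   if to_spawn <= board_room:
--     return to_spawn, 0, 0
--   to_outskirts = to_spawn - board_room
--   outskirts_room = max(outskirts_limit - in_outskirts, 0)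
--   if to_outskirts <= outskirts_room:
--     return board_room, to_outskirts, 0
--   remaining = to_outskirts - outskirts_room
--   if outskirts_limit <= 0:
--     cycles = remaining - 1
--   else:
--     cycles = (remaining - 2) // (outskirts_limit + 1) + 1
--   return board_room, outskirts_room + 1, cycles
-- ===== Notes on version B (the rewrite author's own statement) =====
-- stated objective: faster
-- what changed: Replaces the per-unit while-loop counting outskirts reset cycles with a closed-form floor-division formula (remaining-2)//(outskirts_limit+1)+1 (and remaining-1 when outskirts_limit <= 0).
import Mathlib
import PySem

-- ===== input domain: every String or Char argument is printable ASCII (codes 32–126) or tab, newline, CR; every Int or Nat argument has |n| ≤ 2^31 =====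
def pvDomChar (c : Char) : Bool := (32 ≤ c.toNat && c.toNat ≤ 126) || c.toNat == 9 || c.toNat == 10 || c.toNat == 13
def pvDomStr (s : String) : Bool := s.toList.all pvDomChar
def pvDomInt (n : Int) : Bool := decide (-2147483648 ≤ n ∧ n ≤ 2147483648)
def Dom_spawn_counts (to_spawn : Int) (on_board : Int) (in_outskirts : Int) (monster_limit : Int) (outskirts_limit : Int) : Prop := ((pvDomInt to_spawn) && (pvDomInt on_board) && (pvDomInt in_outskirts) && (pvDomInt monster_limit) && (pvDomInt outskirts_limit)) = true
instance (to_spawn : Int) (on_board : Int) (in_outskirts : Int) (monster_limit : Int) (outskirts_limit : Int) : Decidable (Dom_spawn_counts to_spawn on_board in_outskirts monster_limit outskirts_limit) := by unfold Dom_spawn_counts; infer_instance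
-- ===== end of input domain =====

-- B replaces A's per-unit reset-counting while-loop with a closed-form floor-division formula (objective: faster).

-- ===== PORT A =====
-- A's while-loop: state (remaining, in_outskirts, steps_remaining); returns the final steps_remaining.
def spawnLoopA (remaining io steps L : Int) : Int :=
  if _h : remaining > 0 then
    spawnLoopA (remaining - 1)
      (if io + 1 > L then 0 else io + 1)
      (if io = 0 then steps + 1 else steps) L
  else steps
termination_by remaining.toNat
decreasing_by omega

def spawn_counts (to_spawn : Int) (on_board : Int) (in_outskirts : Int) (monster_limit : Int) (outskirts_limit : Int) : List Int :=
  let available_board_count := max (monster_limit - on_board) 0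
  if to_spawn ≤ available_board_count then [to_spawn, 0, 0]
  else
    let to_outskirts := to_spawn - available_board_count
    let available_outskirts_count := max (outskirts_limit - in_outskirts) 0
    if to_outskirts ≤ available_outskirts_count then [available_board_count, to_outskirts, 0]
    else
      let remaining := to_outskirts - available_outskirts_count
      let steps0 : Int := if outskirts_limit = 0 then -1 else 0
      [available_board_count, available_outskirts_count + 1,
        spawnLoopA remaining outskirts_limit steps0 outskirts_limit]

-- ===== PORT B =====
def spawn_counts_alt (to_spawn : Int) (on_board : Int) (in_outskirts : Int) (monster_limit : Int) (outskirts_limit : Int) : List Int :=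
  let board_room := max (monster_limit - on_board) 0
  if to_spawn ≤ board_room then [to_spawn, 0, 0]
  else
    let to_outskirts := to_spawn - board_room
    let outskirts_room := max (outskirts_limit - in_outskirts) 0
    if to_outskirts ≤ outskirts_room then [board_room, to_outskirts, 0]
    else
      let remaining := to_outskirts - outskirts_room
      let cycles : Int :=
        if outskirts_limit ≤ 0 then remaining - 1
        else PySem.Int.floordiv (remaining - 2) (outskirts_limit + 1) + 1
      [board_room, outskirts_room + 1, cycles]

-- ===== PRECONDITION & SPEC =====
def Spec_spawn_counts (to_spawn : Int) (on_board : Int) (in_outskirts : Int) (monster_limit : Int) (outskirts_limit : Int) (out : List Int) : Prop := out = spawn_counts_alt to_spawn on_board in_outskirts monster_limit outskirts_limit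
instance (to_spawn : Int) (on_board : Int) (in_outskirts : Int) (monster_limit : Int) (outskirts_limit : Int) (out : List Int) : Decidable (Spec_spawn_counts to_spawn on_board in_outskirts monster_limit outskirts_limit out) := by unfold Spec_spawn_counts; infer_instance

-- ===== CLAIM (what is proved, stated in full; the proofs are below) =====
def Claim_equal_spawn_counts : Prop := ∀ (to_spawn : Int) (on_board : Int) (in_outskirts : Int) (monster_limit : Int) (outskirts_limit : Int), Dom_spawn_counts to_spawn on_board in_outskirts monster_limit outskirts_limit → Spec_spawn_counts to_spawn on_board in_outskirts monster_limit outskirts_limit (spawn_counts to_spawn on_board in_outskirts monster_limit outskirts_limit)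

-- ===== LEMMAS AND PROOFS =====

-- When L ≤ 0, every iteration started at io = 0 counts one step (the incremented io immediately resets).
theorem spawnLoopA_nonpos (L : Int) (hL : L ≤ 0) (n : Nat) :
    ∀ s : Int, spawnLoopA (n : Int) 0 s L = s + n := by
  induction n with
  | zero => intro s; rw [spawnLoopA]; simp
  | succ k ih =>
    intro s
    rw [spawnLoopA]
    have h2 : ((k + 1 : Nat) : Int) - 1 = (k : Nat) := by push_cast; ring
    rw [dif_pos (by positivity : ((k + 1 : Nat) : Int) > 0), if_pos (by omega : (0 : Int) + 1 > L),
      if_pos rfl, h2, ih (s + 1)]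
    push_cast; ring

theorem spawnLoopA_nonpos' (L r s : Int) (hL : L ≤ 0) (hr : 0 ≤ r) :
    spawnLoopA r 0 s L = s + r := by
  obtain ⟨n, rfl⟩ := Int.eq_ofNat_of_zero_le hr
  exact spawnLoopA_nonpos L hL n s

-- When L > 0 the io state follows (io + t) mod (L+1); the number of iterations
-- started at io = 0 among the first r is (r + L - ((L+1-io) % (L+1))) / (L+1).
theorem spawnLoopA_pos (L : Int) (hL : 0 < L) (n : Nat) :
    ∀ io s : Int, 0 ≤ io → io ≤ L →
      spawnLoopA (n : Int) io s L = s + ((n : Int) + L - ((L + 1 - io) % (L + 1))) / (L + 1) := by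
  have hm : (0 : Int) < L + 1 := by omega
  induction n with
  | zero =>
    intro io s h0 h1
    rw [spawnLoopA]
    have ht0 : 0 ≤ (L + 1 - io) % (L + 1) := Int.emod_nonneg _ (by omega)
    have ht1 : (L + 1 - io) % (L + 1) < L + 1 := Int.emod_lt_of_pos _ hm
    rw [dif_neg (by simp), Int.ediv_eq_zero_of_lt (by omega) (by omega)]
    simp
  | succ k ih =>
    intro io s h0 h1
    rw [spawnLoopA]
    have h2 : ((k + 1 : Nat) : Int) - 1 = (k : Nat) := by push_cast; ring
    rw [dif_pos (by positivity : ((k + 1 : Nat) : Int) > 0), h2]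
    by_cases hio0 : io = 0
    · subst hio0
      rw [if_pos rfl, if_neg (by omega : ¬ (0 : Int) + 1 > L),
        ih (0 + 1) (s + 1) (by omega) (by omega)]
      have e1 : (L + 1 - (0 + 1)) % (L + 1) = L := by
        rw [Int.emod_eq_of_lt (by omega) (by omega)]; ring
      have e2 : (L + 1 - 0) % (L + 1) = 0 := by simp
      rw [e1, e2]
      have e3 : ((k : Nat) : Int) + L - L = (k : Nat) := by ring
      have e4 : ((k + 1 : Nat) : Int) + L - 0 = ((k : Nat) : Int) + 1 * (L + 1) := by
        push_cast; ring
      rw [e3, e4, Int.add_mul_ediv_right _ _ (by omega : L + 1 ≠ 0)]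
      ring
    · rw [if_neg hio0]
      by_cases hioL : io + 1 > L
      · rw [if_pos hioL, ih 0 s le_rfl hL.le]
        have hio : io = L := by omega
        have e1 : (L + 1 - (0 : Int)) % (L + 1) = 0 := by simp
        have e2 : (L + 1 - io) % (L + 1) = 1 := by
          rw [hio, Int.emod_eq_of_lt (by omega) (by omega)]; ring
        rw [e1, e2]
        congr 1
        congr 1
        push_cast; ring
      · rw [if_neg hioL, ih (io + 1) s (by omega) (by omega)]
        have e1 : (L + 1 - (io + 1)) % (L + 1) = L - io := by
          rw [Int.emod_eq_of_lt (by omega) (by omega)]; ring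
        have e2 : (L + 1 - io) % (L + 1) = L + 1 - io := by
          rw [Int.emod_eq_of_lt (by omega) (by omega)]
        rw [e1, e2]
        congr 1
        congr 1
        push_cast; ring

theorem spawnLoopA_pos' (L r s : Int) (hL : 0 < L) (hr : 1 ≤ r) :
    spawnLoopA r L s L = s + (r + L - 1) / (L + 1) := by
  obtain ⟨n, rfl⟩ := Int.eq_ofNat_of_zero_le (by omega : (0:Int) ≤ r)
  rw [spawnLoopA_pos L hL n L s (by omega) le_rfl]
  have : (L + 1 - L) % (L + 1) = 1 := by
    rw [Int.emod_eq_of_lt (by omega) (by omega)]; ring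
  rw [this]

-- closed-form step count of the loop, starting as A starts it
theorem steps_closed (L r : Int) (hr : 1 ≤ r) :
    spawnLoopA r L (if L = 0 then -1 else 0) L =
      (if L ≤ 0 then r - 1 else PySem.Int.floordiv (r - 2) (L + 1) + 1) := by
  by_cases hL : L ≤ 0
  · rw [if_pos hL]
    by_cases h0 : L = 0
    · subst h0
      rw [if_pos rfl, spawnLoopA_nonpos' 0 r (-1) le_rfl (by omega)]
      ring
    · rw [if_neg h0, spawnLoopA, dif_pos (by omega : r > 0), if_pos (by omega : L + 1 > L),
        if_neg h0, spawnLoopA_nonpos' L (r - 1) 0 hL (by omega)]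
      ring
  · rw [if_neg (by omega : ¬ L = 0), if_neg hL,
      spawnLoopA_pos' L r 0 (by omega) hr,
      PySem.Int.floordiv_eq_ediv_of_pos (by omega : (0:Int) < L + 1)]
    have e : r + L - 1 = (r - 2) + 1 * (L + 1) := by ring
    rw [e, Int.add_mul_ediv_right _ _ (by omega : L + 1 ≠ 0)]
    ring

-- ===== VERDICT (by name: the statement is the Claim_ definition above) =====
theorem spawn_counts_spec : Claim_equal_spawn_counts := by
  intro to_spawn on_board in_outskirts monster_limit outskirts_limit _
  unfold Spec_spawn_counts spawn_counts spawn_counts_alt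
  by_cases h1 : to_spawn ≤ max (monster_limit - on_board) 0
  · rw [if_pos h1, if_pos h1]
  · rw [if_neg h1, if_neg h1]
    by_cases h2 : to_spawn - max (monster_limit - on_board) 0 ≤ max (outskirts_limit - in_outskirts) 0
    · rw [if_pos h2, if_pos h2]
    · rw [if_neg h2, if_neg h2]
      have hr : 1 ≤ to_spawn - max (monster_limit - on_board) 0 - max (outskirts_limit - in_outskirts) 0 := by omega
      simp only [steps_closed outskirts_limit _ hr]
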